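-- pv_equiv track=rewrite | github.com/karas111/advent_of_code | year2019/day3/b.py | get_wire_points
-- ===== SOURCE A (Python) =====
-- def get_wire_points(wire_direction, starting_point=(0, 0)):
--     steps = 0
--     points = {}
--     for modifier, length in wire_direction:
--         for i in range(length):
--             starting_point = (starting_point[0] + modifier[0], starting_point[1] + modifier[1])
--             steps += 1
--             if starting_point not in points:
--                 points[starting_point] = steps
--     return points
-- ===== SOURCE B (Python) =====
-- def get_wire_points(wire_direction, starting_point=(0, 0)):
--     # Divide and conquer: each segment's first-visit dict is written in closed
--     # form relative to its own start; two relative solutions merge by shifting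
--     # the right half's points/steps by the left half's endpoint/step count.
--     def segment(m, n):
--         if n <= 0:
--             return {}, (0, 0), 0
--         if m == (0, 0):
--             return {(0, 0): 1}, (0, 0), n
--         return ({(k * m[0], k * m[1]): k for k in range(1, n + 1)},
--                 (n * m[0], n * m[1]), n)
--
--     def merge(left, right):
--         d1, e1, s1 = left
--         d2, e2, s2 = right
--         d = dict(d1)
--         for (x, y), k in d2.items():
--             d.setdefault((x + e1[0], y + e1[1]), k + s1)
--         return d, (e1[0] + e2[0], e1[1] + e2[1]), s1 + s2
--
--     def solve(segs):
--         if not segs: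
--             return {}, (0, 0), 0
--         if len(segs) == 1:
--             return segment(*segs[0])
--         mid = len(segs) // 2
--         return merge(solve(segs[:mid]), solve(segs[mid:]))
--
--     d, _, _ = solve(wire_direction)
--     return {(x + starting_point[0], y + starting_point[1]): k
--             for (x, y), k in d.items()}
-- ===== Notes on version B (the rewrite author's own statement) =====
-- stated objective: alternative
-- what changed: B replaces A's unit-step simulation (walking the wire one cell at a time, mutating position/step counter/dict) by a divide-and-conquer: each segment's first-visit dict is written in closed form (k*modifier -> k) relative to its own origin, and two relative solutions are merged by translating the right half's keys and step values by the left half's endpoint and step count, keeping the left value on collisions.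
import Mathlib
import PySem

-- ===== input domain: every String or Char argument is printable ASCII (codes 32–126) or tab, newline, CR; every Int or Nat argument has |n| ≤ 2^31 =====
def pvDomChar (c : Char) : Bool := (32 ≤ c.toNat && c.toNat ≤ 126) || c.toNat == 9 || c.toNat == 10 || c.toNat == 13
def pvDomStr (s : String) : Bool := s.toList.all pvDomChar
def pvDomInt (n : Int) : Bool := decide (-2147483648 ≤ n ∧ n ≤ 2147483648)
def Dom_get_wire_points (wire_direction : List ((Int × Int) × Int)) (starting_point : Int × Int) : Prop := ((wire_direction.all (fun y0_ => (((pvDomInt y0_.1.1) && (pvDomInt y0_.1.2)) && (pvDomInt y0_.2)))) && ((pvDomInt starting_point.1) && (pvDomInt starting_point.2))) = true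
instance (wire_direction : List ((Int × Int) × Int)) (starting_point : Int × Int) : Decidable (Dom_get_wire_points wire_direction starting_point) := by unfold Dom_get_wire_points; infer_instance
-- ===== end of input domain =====

-- B replaces A's unit-step walk by divide-and-conquer: closed-form per-segment first-visit
-- dicts, merged by translating the right half by the left half's endpoint and step count
-- (same result, different algorithm; not claimed faster).
-- The dict {(x,y): step} is represented as an insertion-ordered list of flattened triples (x, y, step).

-- ===== PORT A =====
-- 'starting_point in points' membership test on the key (x, y)
def pvKeyMem (pts : List (Int × Int × Int)) (p : Int × Int) : Bool :=
  pts.any (fun e => e.1 == p.1 && e.2.1 == p.2)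

-- 'if starting_point not in points: points[starting_point] = steps' (= dict.setdefault in B's merge)
def pvVisit (pts : List (Int × Int × Int)) (p : Int × Int) (s : Int) : List (Int × Int × Int) :=
  if pvKeyMem pts p then pts else pts ++ [(p.1, p.2, s)]

-- inner 'for i in range(length)' loop; Python range(length) is empty for length ≤ 0, hence .toNat fuel
def pvInnerA (m : Int × Int) : Nat → Int → (Int × Int) → List (Int × Int × Int) →
    Int × (Int × Int) × List (Int × Int × Int)
  | 0, steps, sp, pts => (steps, sp, pts)
  | n + 1, steps, sp, pts =>
      let sp' := (sp.1 + m.1, sp.2 + m.2)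
      pvInnerA m n (steps + 1) sp' (pvVisit pts sp' (steps + 1))

-- outer 'for modifier, length in wire_direction' loop
def pvOuterA : List ((Int × Int) × Int) → Int → (Int × Int) → List (Int × Int × Int) →
    List (Int × Int × Int)
  | [], _, _, pts => pts
  | ml :: rest, steps, sp, pts =>
      let r := pvInnerA ml.1 ml.2.toNat steps sp pts
      pvOuterA rest r.1 r.2.1 r.2.2

def get_wire_points (wire_direction : List ((Int × Int) × Int)) (starting_point : Int × Int) : List (Int × Int × Int) :=
  pvOuterA wire_direction 0 starting_point []

-- ===== PORT B =====
-- segment(m, n): closed-form relative solution (dict, endpoint, steps) of one segment;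
-- in the last branch the keys k*m are pairwise distinct (m ≠ (0,0)), so the Python dict
-- comprehension over range(1, n+1) is exactly this map
def pvSegment (m : Int × Int) (n : Int) : List (Int × Int × Int) × (Int × Int) × Int :=
  if n ≤ 0 then ([], (0, 0), 0)
  else if m.1 == 0 && m.2 == 0 then ([(0, 0, 1)], (0, 0), n)
  else ((PySem.List.pyRange 1 (n + 1) 1).map (fun k => (k * m.1, k * m.2, k)),
        (n * m.1, n * m.2), n)

-- merge(left, right): d = dict(d1); then setdefault of each shifted entry of d2
def pvMergeB (l r : List (Int × Int × Int) × (Int × Int) × Int) :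
    List (Int × Int × Int) × (Int × Int) × Int :=
  (r.1.foldl (fun d e => pvVisit d (e.1 + l.2.1.1, e.2.1 + l.2.1.2) (e.2.2 + l.2.2)) l.1,
   (l.2.1.1 + r.2.1.1, l.2.1.2 + r.2.1.2), l.2.2 + r.2.2)

-- solve(segs): split at mid = len(segs)//2 (both slice bounds are in range, so
-- segs[:mid]/segs[mid:] are take/drop)
def pvSolve : List ((Int × Int) × Int) → List (Int × Int × Int) × (Int × Int) × Int
  | [] => ([], (0, 0), 0)
  | [ml] => pvSegment ml.1 ml.2
  | a :: b :: rest =>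
      pvMergeB (pvSolve ((a :: b :: rest).take ((a :: b :: rest).length / 2)))
               (pvSolve ((a :: b :: rest).drop ((a :: b :: rest).length / 2)))
  termination_by segs => segs.length
  decreasing_by
    · simp [List.length_take]; omega
    · simp; omega

-- final comprehension: shift every key by starting_point (keys stay distinct, order kept)
def get_wire_points_alt (wire_direction : List ((Int × Int) × Int)) (starting_point : Int × Int) : List (Int × Int × Int) :=
  (pvSolve wire_direction).1.map (fun e => (e.1 + starting_point.1, e.2.1 + starting_point.2, e.2.2))

-- ===== PRECONDITION & SPEC =====
def Spec_get_wire_points (wire_direction : List ((Int × Int) × Int)) (starting_point : Int × Int) (out : List (Int × Int × Int)) : Prop := out = get_wire_points_alt wire_direction starting_point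
instance (wire_direction : List ((Int × Int) × Int)) (starting_point : Int × Int) (out : List (Int × Int × Int)) : Decidable (Spec_get_wire_points wire_direction starting_point out) := by unfold Spec_get_wire_points; infer_instance

-- ===== CLAIM (what is proved, stated in full; the proofs are below) =====
def Claim_equal_get_wire_points : Prop := ∀ (wire_direction : List ((Int × Int) × Int)) (starting_point : Int × Int), Dom_get_wire_points wire_direction starting_point → Spec_get_wire_points wire_direction starting_point (get_wire_points wire_direction starting_point)

-- ===== LEMMAS AND PROOFS =====

-- reference single flattened loop A's nested loops reduce to
def pvLoop : List (Int × Int) → Int → (Int × Int) → List (Int × Int × Int) →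
    Int × (Int × Int) × List (Int × Int × Int)
  | [], steps, sp, pts => (steps, sp, pts)
  | m :: rest, steps, sp, pts =>
      let sp' := (sp.1 + m.1, sp.2 + m.2)
      pvLoop rest (steps + 1) sp' (pvVisit pts sp' (steps + 1))

def pvMoves (wd : List ((Int × Int) × Int)) : List (Int × Int) :=
  wd.flatMap (fun ml => List.replicate ml.2.toNat ml.1)

def pvSum (ms : List (Int × Int)) : Int × Int :=
  ms.foldr (fun m acc => (m.1 + acc.1, m.2 + acc.2)) (0, 0)

-- first-visit dict of a move list, relative to origin / step 0
def pvD0 (ms : List (Int × Int)) : List (Int × Int × Int) :=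
  (pvLoop ms 0 (0, 0) []).2.2

-- translate a relative dict by offset a and step offset s
def pvShift (a : Int × Int) (s : Int) (D : List (Int × Int × Int)) : List (Int × Int × Int) :=
  D.map (fun e => (e.1 + a.1, e.2.1 + a.2, e.2.2 + s))

-- fold a dict's entries into an accumulator with first-wins semantics
def pvMF (acc D : List (Int × Int × Int)) : List (Int × Int × Int) :=
  D.foldl (fun d e => pvVisit d (e.1, e.2.1) e.2.2) acc

def pvKeysND (pts : List (Int × Int × Int)) : Prop :=
  pts.Pairwise (fun a b => ¬(a.1 = b.1 ∧ a.2.1 = b.2.1))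

theorem pvLoop_append (xs ys : List (Int × Int)) (steps : Int) (sp : Int × Int)
    (pts : List (Int × Int × Int)) :
    pvLoop (xs ++ ys) steps sp pts =
      pvLoop ys (pvLoop xs steps sp pts).1 (pvLoop xs steps sp pts).2.1 (pvLoop xs steps sp pts).2.2 := by
  induction xs generalizing steps sp pts with
  | nil => simp [pvLoop]
  | cons m rest ih => simp [pvLoop, ih]

theorem pvInnerA_eq_loop (m : Int × Int) (n : Nat) (steps : Int) (sp : Int × Int)
    (pts : List (Int × Int × Int)) :
    pvInnerA m n steps sp pts = pvLoop (List.replicate n m) steps sp pts := by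
  induction n generalizing steps sp pts with
  | zero => simp [pvInnerA, pvLoop]
  | succ k ih => simp [pvInnerA, pvLoop, List.replicate_succ, ih]

theorem pvOuterA_eq_loop (wd : List ((Int × Int) × Int)) (steps : Int) (sp : Int × Int)
    (pts : List (Int × Int × Int)) :
    pvOuterA wd steps sp pts = (pvLoop (pvMoves wd) steps sp pts).2.2 := by
  induction wd generalizing steps sp pts with
  | nil => simp [pvOuterA, pvMoves, pvLoop]
  | cons ml rest ih =>
      simp [pvOuterA, pvMoves, pvInnerA_eq_loop, ih, pvLoop_append]

theorem pvLoop_fst (ms : List (Int × Int)) (steps : Int) (sp : Int × Int)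
    (pts : List (Int × Int × Int)) :
    (pvLoop ms steps sp pts).1 = steps + ms.length := by
  induction ms generalizing steps sp pts with
  | nil => simp [pvLoop]
  | cons m rest ih => simp [pvLoop, ih]; ring

theorem pvLoop_snd (ms : List (Int × Int)) (steps : Int) (sp : Int × Int)
    (pts : List (Int × Int × Int)) :
    (pvLoop ms steps sp pts).2.1 = (sp.1 + (pvSum ms).1, sp.2 + (pvSum ms).2) := by
  induction ms generalizing steps sp pts with
  | nil => simp [pvLoop, pvSum]
  | cons m rest ih => simp [pvLoop, pvSum, ih]; constructor <;> ring

-- shifting commutes with membership / visiting / merging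
theorem pvBeqAdd (x y a : Int) : (x + a == y + a) = (x == y) := by
  by_cases h : x = y <;> simp [h]

theorem pvKeyMem_shift (a : Int × Int) (s : Int) (pts : List (Int × Int × Int)) (p : Int × Int) :
    pvKeyMem (pvShift a s pts) (p.1 + a.1, p.2 + a.2) = pvKeyMem pts p := by
  induction pts with
  | nil => rfl
  | cons e t ih =>
      simp only [pvKeyMem, pvShift, List.map_cons, List.any_cons] at ih ⊢
      rw [pvBeqAdd, pvBeqAdd, ih]

theorem pvVisit_shift (a : Int × Int) (s : Int) (pts : List (Int × Int × Int)) (p : Int × Int) (k : Int) :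
    pvVisit (pvShift a s pts) (p.1 + a.1, p.2 + a.2) (k + s) = pvShift a s (pvVisit pts p k) := by
  simp only [pvVisit, pvKeyMem_shift]
  split_ifs <;> simp [pvShift]

theorem pvMF_cons (acc : List (Int × Int × Int)) (e : Int × Int × Int) (D : List (Int × Int × Int)) :
    pvMF acc (e :: D) = pvMF (pvVisit acc (e.1, e.2.1) e.2.2) D := rfl

theorem pvMF_shift (a : Int × Int) (s : Int) (pts D : List (Int × Int × Int)) :
    pvMF (pvShift a s pts) (pvShift a s D) = pvShift a s (pvMF pts D) := by
  induction D generalizing pts with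
  | nil => simp [pvMF, pvShift]
  | cons e D ih =>
      rw [show pvShift a s (e :: D) = (e.1 + a.1, e.2.1 + a.2, e.2.2 + s) :: pvShift a s D from rfl,
          pvMF_cons, pvMF_cons]
      have h := pvVisit_shift a s pts (e.1, e.2.1) e.2.2
      rw [show ((e.1 + a.1, e.2.1 + a.2, e.2.2 + s) : Int × Int × Int).1 = e.1 + a.1 from rfl]
      rw [h]
      exact ih _

theorem pvShift_shift (a b : Int × Int) (s t : Int) (D : List (Int × Int × Int)) :
    pvShift a s (pvShift b t D) = pvShift (b.1 + a.1, b.2 + a.2) (t + s) D := by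
  simp only [pvShift, List.map_map]
  apply List.map_congr_left
  intro e _
  simp [Function.comp]; refine ⟨by ring, by ring, by ring⟩

-- key-membership monotonicity
theorem pvKeyMem_visit_of_mem (pts : List (Int × Int × Int)) (q p : Int × Int) (s : Int)
    (h : pvKeyMem pts p = true) : pvKeyMem (pvVisit pts q s) p = true := by
  unfold pvVisit; split_ifs with hq
  · exact h
  · simp [pvKeyMem, List.any_append] at h ⊢; left; exact h

theorem pvKeyMem_visit_self (pts : List (Int × Int × Int)) (p : Int × Int) (s : Int) :
    pvKeyMem (pvVisit pts p s) p = true := by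
  unfold pvVisit; split_ifs with hq
  · exact hq
  · simp [pvKeyMem, List.any_append]

theorem pvKeyMem_MF_acc (D acc : List (Int × Int × Int)) (p : Int × Int)
    (h : pvKeyMem acc p = true) : pvKeyMem (pvMF acc D) p = true := by
  induction D generalizing acc with
  | nil => simpa [pvMF] using h
  | cons e D ih =>
      simp only [pvMF, List.foldl_cons]
      exact ih _ (pvKeyMem_visit_of_mem _ _ _ _ h)

theorem pvKeyMem_MF_arg (D acc : List (Int × Int × Int)) (p : Int × Int)
    (h : pvKeyMem D p = true) : pvKeyMem (pvMF acc D) p = true := by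
  induction D generalizing acc with
  | nil => simp [pvKeyMem] at h
  | cons e D ih =>
      simp only [pvKeyMem, List.any_cons] at h
      simp only [pvMF, List.foldl_cons]
      rcases Bool.or_eq_true_iff.mp h with he | hD
      · have h1 : e.1 = p.1 ∧ e.2.1 = p.2 := by
          simp only [Bool.and_eq_true, beq_iff_eq] at he; exact he
        rw [h1.1, h1.2]
        have hself := pvKeyMem_visit_self acc p e.2.2
        have : pvKeyMem (pvVisit acc (p.1, p.2) e.2.2) p = true := by simpa using hself
        exact pvKeyMem_MF_acc _ _ _ this
      · exact ih _ hD

theorem pvMF_visit (pts q : List (Int × Int × Int)) (p : Int × Int) (v : Int) :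
    pvMF pts (pvVisit q p v) = pvVisit (pvMF pts q) p v := by
  by_cases hq : pvKeyMem q p = true
  · rw [show pvVisit q p v = q from by simp [pvVisit, hq]]
    have h2 : pvKeyMem (pvMF pts q) p = true := pvKeyMem_MF_arg q pts p hq
    simp [pvVisit, h2]
  · rw [show pvVisit q p v = q ++ [(p.1, p.2, v)] from by simp [pvVisit, hq]]
    simp [pvMF, List.foldl_append]

theorem pvMF_assoc (D pts q : List (Int × Int × Int)) :
    pvMF pts (pvMF q D) = pvMF (pvMF pts q) D := by
  induction D generalizing q with
  | nil => simp [pvMF]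
  | cons e D ih =>
      rw [pvMF_cons, pvMF_cons, ih (pvVisit q (e.1, e.2.1) e.2.2), pvMF_visit]

-- the central characterisation: the A-loop's dict is the accumulator merged with the shifted relative dict
theorem pvLoop_dict (ms : List (Int × Int)) (steps : Int) (sp : Int × Int)
    (pts : List (Int × Int × Int)) :
    (pvLoop ms steps sp pts).2.2 = pvMF pts (pvShift sp steps (pvD0 ms)) := by
  induction ms generalizing steps sp pts with
  | nil => simp [pvLoop, pvD0, pvShift, pvMF]
  | cons m ms ih =>
      have hD0 : pvD0 (m :: ms) = pvMF [(m.1, m.2, 1)] (pvShift (m.1, m.2) 1 (pvD0 ms)) := by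
        show (pvLoop (m :: ms) 0 (0, 0) []).2.2 = _
        rw [show pvLoop (m :: ms) 0 (0, 0) []
              = pvLoop ms 1 ((0 : Int) + m.1, (0 : Int) + m.2)
                  (pvVisit [] ((0 : Int) + m.1, (0 : Int) + m.2) 1) from rfl]
        simp only [zero_add]
        rw [show pvVisit [] (m.1, m.2) 1 = [(m.1, m.2, 1)] from by simp [pvVisit, pvKeyMem]]
        exact ih 1 (m.1, m.2) [(m.1, m.2, 1)]
      rw [show pvLoop (m :: ms) steps sp pts
            = pvLoop ms (steps + 1) (sp.1 + m.1, sp.2 + m.2)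
                (pvVisit pts (sp.1 + m.1, sp.2 + m.2) (steps + 1)) from rfl]
      rw [ih, hD0, ← pvMF_shift, pvMF_assoc, pvShift_shift]
      rw [show pvShift sp steps [(m.1, m.2, 1)] = [(m.1 + sp.1, m.2 + sp.2, 1 + steps)] from rfl]
      rw [show pvMF pts [(m.1 + sp.1, m.2 + sp.2, 1 + steps)]
            = pvVisit pts (m.1 + sp.1, m.2 + sp.2) (1 + steps) from rfl]
      rw [show ((m.1, m.2) : Int × Int).1 + sp.1 = sp.1 + m.1 from by ring,
          show ((m.1, m.2) : Int × Int).2 + sp.2 = sp.2 + m.2 from by ring,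
          show (1 : Int) + steps = steps + 1 from by ring]

theorem pvD0_cons (m : Int × Int) (ms : List (Int × Int)) :
    pvD0 (m :: ms) = pvMF [(m.1, m.2, 1)] (pvShift (m.1, m.2) 1 (pvD0 ms)) := by
  show (pvLoop (m :: ms) 0 (0, 0) []).2.2 = _
  rw [show pvLoop (m :: ms) 0 (0, 0) []
        = pvLoop ms 1 ((0 : Int) + m.1, (0 : Int) + m.2)
            (pvVisit [] ((0 : Int) + m.1, (0 : Int) + m.2) 1) from rfl]
  simp only [zero_add]
  rw [show pvVisit [] (m.1, m.2) 1 = [(m.1, m.2, 1)] from by simp [pvVisit, pvKeyMem]]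
  exact pvLoop_dict ms 1 (m.1, m.2) [(m.1, m.2, 1)]

theorem pvD0_append (xs ys : List (Int × Int)) :
    pvD0 (xs ++ ys) = pvMF (pvD0 xs) (pvShift (pvSum xs) xs.length (pvD0 ys)) := by
  unfold pvD0
  rw [pvLoop_append, pvLoop_dict, pvLoop_fst, pvLoop_snd]
  simp [pvD0]

-- key-distinctness invariants
theorem pvVisit_nd (pts : List (Int × Int × Int)) (p : Int × Int) (s : Int)
    (h : pvKeysND pts) : pvKeysND (pvVisit pts p s) := by
  unfold pvVisit; split_ifs with hm
  · exact h
  · unfold pvKeysND at *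
    rw [List.pairwise_append]
    refine ⟨h, by simp, ?_⟩
    intro a ha b hb
    simp only [List.mem_singleton] at hb
    subst hb
    rw [Bool.not_eq_true] at hm
    simp only [pvKeyMem, List.any_eq_false, Bool.and_eq_true, beq_iff_eq, not_and] at hm
    intro hc
    exact hm a ha hc.1 hc.2

theorem pvLoop_nd (ms : List (Int × Int)) (steps : Int) (sp : Int × Int)
    (pts : List (Int × Int × Int)) (h : pvKeysND pts) :
    pvKeysND ((pvLoop ms steps sp pts).2.2) := by
  induction ms generalizing steps sp pts with
  | nil => simpa [pvLoop] using h
  | cons m rest ih => exact ih _ _ _ (pvVisit_nd _ _ _ h)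

theorem pvD0_nd (ms : List (Int × Int)) : pvKeysND (pvD0 ms) :=
  pvLoop_nd ms 0 (0, 0) [] (by simp [pvKeysND])

theorem pvShift_nd (a : Int × Int) (s : Int) (D : List (Int × Int × Int))
    (h : pvKeysND D) : pvKeysND (pvShift a s D) := by
  unfold pvKeysND pvShift at *
  refine h.map _ ?_
  intro x y hxy hc
  rcases hc with ⟨h1, h2⟩
  simp only at h1 h2
  exact hxy ⟨by omega, by omega⟩

theorem pvMF_disjoint (D acc : List (Int × Int × Int))
    (hd : ∀ e ∈ D, pvKeyMem acc (e.1, e.2.1) = false) (hnd : pvKeysND D) :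
    pvMF acc D = acc ++ D := by
  induction D generalizing acc with
  | nil => simp [pvMF]
  | cons e D ih =>
      rw [pvMF_cons]
      rw [show pvVisit acc (e.1, e.2.1) e.2.2 = acc ++ [e] from by
        simp [pvVisit, hd e (by simp)]]
      have hnd' := List.pairwise_cons.mp hnd
      rw [ih (acc ++ [e]) ?_ hnd'.2]
      · simp
      · intro d hdD
        have h1 := hd d (List.mem_cons_of_mem _ hdD)
        have h2 := hnd'.1 d hdD
        simp [pvKeyMem] at h1 ⊢
        exact ⟨h1, fun ha hb => h2 ⟨ha, hb⟩⟩

-- the closed-form segment list B writes for m ≠ (0,0)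
def pvSeg (m : Int × Int) (n : Nat) : List (Int × Int × Int) :=
  (List.range n).map (fun k : Nat => (((k : Int) + 1) * m.1, ((k : Int) + 1) * m.2, ((k : Int) + 1)))

theorem pvD0_replicate (m : Int × Int) (hm : ¬(m.1 = 0 ∧ m.2 = 0)) (n : Nat) :
    pvD0 (List.replicate n m) = pvSeg m n := by
  induction n with
  | zero => rfl
  | succ k ih =>
      rw [List.replicate_succ, pvD0_cons, ih]
      have hsh : pvShift (m.1, m.2) 1 (pvSeg m k)
          = (List.range k).map (fun j : Nat => (((j : Int) + 2) * m.1, ((j : Int) + 2) * m.2, ((j : Int) + 2))) := by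
        unfold pvShift pvSeg
        rw [List.map_map]
        apply List.map_congr_left
        intro j _
        simp only [Function.comp, Prod.mk.injEq]
        refine ⟨by ring, by ring, by ring⟩
      rw [hsh, pvMF_disjoint]
      · unfold pvSeg
        rw [List.range_succ_eq_map, List.map_cons, List.map_map, List.singleton_append]
        refine List.cons_eq_cons.mpr ⟨by norm_num, ?_⟩
        apply List.map_congr_left
        intro j _
        simp only [Function.comp, Prod.mk.injEq]
        refine ⟨by push_cast; ring, by push_cast; ring, by push_cast; ring⟩
      · intro e he
        simp only [List.mem_map, List.mem_range] at he
        obtain ⟨j, hj, rfl⟩ := he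
        simp only [pvKeyMem, List.any_cons, List.any_nil, Bool.or_false,
          Bool.and_eq_false_iff]
        by_cases hc1 : ((j : Int) + 2) * m.1 = m.1
        · have hz1 : ((j : Int) + 1) * m.1 = 0 := by ring_nf at hc1 ⊢; linarith
          have hm1 : m.1 = 0 := by
            rcases mul_eq_zero.mp hz1 with h' | h'
            · exfalso; omega
            · exact h'
          right
          simp only [beq_eq_false_iff_ne, ne_eq]
          intro hc2
          have hz2 : ((j : Int) + 1) * m.2 = 0 := by ring_nf at hc2 ⊢; linarith
          have hm2 : m.2 = 0 := by
            rcases mul_eq_zero.mp hz2 with h' | h'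
            · exfalso; omega
            · exact h'
          exact hm ⟨hm1, hm2⟩
        · left
          simp only [beq_eq_false_iff_ne, ne_eq]
          exact fun h => hc1 h.symm
      · unfold pvKeysND
        refine List.Pairwise.map _ ?_ List.pairwise_lt_range
        intro a b hab hc
        rcases hc with ⟨h1, h2⟩
        simp only at h1 h2
        have hm1 : m.1 = 0 := by
          have hz : ((a : Int) - b) * m.1 = 0 := by ring_nf at h1 ⊢; linarith
          rcases mul_eq_zero.mp hz with h' | h'
          · exfalso; omega
          · exact h'
        have hm2 : m.2 = 0 := by
          have hz : ((a : Int) - b) * m.2 = 0 := by ring_nf at h2 ⊢; linarith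
          rcases mul_eq_zero.mp hz with h' | h'
          · exfalso; omega
          · exact h'
        exact hm ⟨hm1, hm2⟩

theorem pvD0_replicate_zero (n : Nat) (hn : 0 < n) :
    pvD0 (List.replicate n ((0 : Int), (0 : Int))) = [(0, 0, 1)] := by
  induction n with
  | zero => exact absurd hn (lt_irrefl 0)
  | succ k ih =>
      rcases Nat.eq_zero_or_pos k with hk | hk
      · subst hk; decide
      · rw [List.replicate_succ, pvD0_cons, ih hk]; decide

theorem pvSum_cons (x : Int × Int) (l : List (Int × Int)) :
    pvSum (x :: l) = (x.1 + (pvSum l).1, x.2 + (pvSum l).2) := rfl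

theorem pvSum_replicate (m : Int × Int) (n : Nat) :
    pvSum (List.replicate n m) = ((n : Int) * m.1, (n : Int) * m.2) := by
  induction n with
  | zero => simp [pvSum]
  | succ k ih =>
      rw [List.replicate_succ, pvSum_cons, ih]
      simp only [Prod.mk.injEq]
      refine ⟨by push_cast; ring, by push_cast; ring⟩

theorem pvSum_append (xs ys : List (Int × Int)) :
    pvSum (xs ++ ys) = ((pvSum xs).1 + (pvSum ys).1, (pvSum xs).2 + (pvSum ys).2) := by
  induction xs with
  | nil => simp [pvSum]
  | cons x xs ih =>
      rw [List.cons_append, pvSum_cons, ih, pvSum_cons]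
      simp only [Prod.mk.injEq]
      refine ⟨by ring, by ring⟩

theorem pvSegment_correct (m : Int × Int) (n : Int) :
    pvSegment m n = (pvD0 (List.replicate n.toNat m), pvSum (List.replicate n.toNat m),
      (n.toNat : Int)) := by
  unfold pvSegment
  split_ifs with h1 h2
  · have h0 : n.toNat = 0 := by omega
    rw [h0]
    rfl
  · have hn : 0 < n := by omega
    have hmeq : m = ((0 : Int), (0 : Int)) := by
      simp only [Bool.and_eq_true, beq_iff_eq] at h2
      exact Prod.ext h2.1 h2.2
    rw [hmeq, pvD0_replicate_zero _ (by omega : 0 < n.toNat), pvSum_replicate]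
    simp [Int.toNat_of_nonneg hn.le]
  · have hn : 0 < n := by omega
    have hm : ¬(m.1 = 0 ∧ m.2 = 0) := fun hc => by simp [hc.1, hc.2] at h2
    rw [pvD0_replicate m hm, pvSum_replicate]
    have hcast : ((n.toNat : Int)) = n := Int.toNat_of_nonneg hn.le
    rw [hcast]
    refine Prod.ext ?_ rfl
    rw [PySem.List.pyRange_one, List.map_map]
    have hsimp : (n + 1 - 1 : Int).toNat = n.toNat := by omega
    rw [hsimp]
    unfold pvSeg
    apply List.map_congr_left
    intro j _
    simp only [Function.comp, Prod.mk.injEq]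
    refine ⟨by ring, by ring, by ring⟩

theorem pvMergeB_MF (l r : List (Int × Int × Int) × (Int × Int) × Int) :
    pvMergeB l r = (pvMF l.1 (pvShift l.2.1 l.2.2 r.1),
      (l.2.1.1 + r.2.1.1, l.2.1.2 + r.2.1.2), l.2.2 + r.2.2) := by
  unfold pvMergeB pvMF pvShift
  rw [List.foldl_map]

theorem pvSolve_correct (segs : List ((Int × Int) × Int)) :
    pvSolve segs = (pvD0 (pvMoves segs), pvSum (pvMoves segs),
      ((pvMoves segs).length : Int)) := by
  induction segs using pvSolve.induct with
  | case1 => simp [pvSolve, pvMoves, pvD0, pvSum, pvLoop]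
  | case2 ml =>
      rw [pvSolve, pvSegment_correct]
      simp [pvMoves]
  | case3 a b rest ih1 ih2 =>
      rw [pvSolve, ih1, ih2, pvMergeB_MF]
      have hsplit : pvMoves ((a :: b :: rest).take ((a :: b :: rest).length / 2))
          ++ pvMoves ((a :: b :: rest).drop ((a :: b :: rest).length / 2))
          = pvMoves (a :: b :: rest) := by
        unfold pvMoves
        rw [← List.flatMap_append, List.take_append_drop]
      rw [← hsplit, pvD0_append, pvSum_append, List.length_append]
      refine Prod.ext rfl (Prod.ext rfl ?_)
      push_cast
      ring

-- ===== VERDICT (by name: the statement is the Claim_ definition above) =====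
theorem get_wire_points_spec : Claim_equal_get_wire_points := by
  intro wd sp _
  unfold Spec_get_wire_points get_wire_points get_wire_points_alt
  rw [pvOuterA_eq_loop, pvLoop_dict, pvSolve_correct]
  rw [pvMF_disjoint _ [] (fun e _ => rfl) (pvShift_nd _ _ _ (pvD0_nd _))]
  simp [pvShift]
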